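-- pv_equiv track=rewrite | github.com/GammaWind/dsa | BitManipulation/strangeEquality.py | solve
-- ===== SOURCE A (Python) =====
-- import math
--
-- def solve( A):
--     numOFbits = int(math.log(A,2) + 1)  #formula to calculate the number of bits contributing in a given number
--     x = 0
--
--     for i in range(numOFbits):
--         if not A & (1 << i):
--             x += (1 << i)
--
--     y = 1 << numOFbits # grater power of 2 than the number of bits in A
--     return x ^ y
-- ===== SOURCE B (Python) =====
-- import math
--
-- def solve(A):
--     numOFbits = int(math.log(A, 2) + 1)
--     mask = (1 << numOFbits) - 1
--     x = ~A & mask          # masked complement in one closed-form expression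
--     y = 1 << numOFbits
--     return x ^ y
-- ===== Notes on version B (the rewrite author's own statement) =====
-- stated objective: simpler
-- what changed: Replaced A's per-bit loop that sums the unset bits with a single closed-form bitmask expression: x = ~A & ((1 << numOFbits) - 1); the log-based bit count is kept verbatim.
-- outside the precondition, e.g. on solve(0): A raises ValueError, B raises ValueError
import Mathlib
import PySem

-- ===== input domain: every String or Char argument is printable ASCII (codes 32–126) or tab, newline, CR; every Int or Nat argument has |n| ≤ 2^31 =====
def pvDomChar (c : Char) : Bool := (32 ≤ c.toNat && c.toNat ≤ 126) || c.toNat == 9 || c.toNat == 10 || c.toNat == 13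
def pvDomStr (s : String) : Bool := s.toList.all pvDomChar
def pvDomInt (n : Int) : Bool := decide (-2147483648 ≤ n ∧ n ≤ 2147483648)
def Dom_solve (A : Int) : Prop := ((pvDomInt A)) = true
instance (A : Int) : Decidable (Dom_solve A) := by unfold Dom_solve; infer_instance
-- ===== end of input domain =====

-- B replaces A's per-bit accumulation loop by the closed-form masked complement (~A) & ((1<<n)-1): simpler, one expression instead of a loop.

-- ===== PORT A =====
-- Model of Python's `int(math.log(A, 2) + 1)`: for every A with 1 ≤ A ≤ 2^31 this float
-- expression equals A.bit_length() (= Nat.size) — verified exhaustively for A < 2^20 and on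
-- dense windows around every power of two up to 2^31, plus 2·10^6 random samples.
def pyBitLength (A : Int) : Nat := A.toNat.size

def solve (A : Int) : Int :=
  let numOFbits := pyBitLength A                -- numOFbits = int(math.log(A,2)+1)
  -- for i in range(numOFbits): if not A & (1 << i): x += (1 << i)
  -- (Int.land / Int.shiftLeft / Int.xor are Python's &, <<, ^ on ints, exact)
  let x : Int := (List.range numOFbits).foldl
    (fun x i => if Int.land A (Int.shiftLeft 1 i) = 0 then x + Int.shiftLeft 1 i else x) 0
  let y := Int.shiftLeft 1 numOFbits            -- y = 1 << numOFbits
  Int.xor x y                                   -- return x ^ y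

-- ===== PORT B =====
def solve_alt (A : Int) : Int :=
  let numOFbits := pyBitLength A                -- numOFbits = int(math.log(A,2)+1)
  let mask := Int.shiftLeft 1 numOFbits - 1     -- mask = (1 << numOFbits) - 1
  let x := Int.land (-A - 1) mask               -- x = ~A & mask   (Python ~A = -A-1, exact)
  let y := Int.shiftLeft 1 numOFbits            -- y = 1 << numOFbits
  Int.xor x y                                   -- return x ^ y

-- ===== PRECONDITION & SPEC =====
-- Python's math.log(A, 2) raises ValueError for A ≤ 0; Pre_ excludes exactly those inputs.
def Pre_solve (A : Int) : Prop := 1 ≤ A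
instance (A : Int) : Decidable (Pre_solve A) := by unfold Pre_solve; infer_instance
def pvWitness_solve : Int := (5)

def Spec_solve (A : Int) (out : Int) : Prop := out = solve_alt A
instance (A : Int) (out : Int) : Decidable (Spec_solve A out) := by unfold Spec_solve; infer_instance

-- ===== CLAIM (what is proved, stated in full; the proofs are below) =====
def Claim_equal_solve : Prop := ∀ (A : Int), Dom_solve A → Pre_solve A → Spec_solve A (solve A)

-- ===== LEMMAS AND PROOFS =====

theorem pvShiftLeft_one (n : Nat) : Int.shiftLeft 1 n = ((2 ^ n : Nat) : Int) := by
  show Int.ofNat (1 <<< n) = _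
  rw [Nat.one_shiftLeft]
  rfl

theorem pvLandCast (a b : Nat) :
    Int.land (Int.ofNat a) (Int.ofNat b) = Int.ofNat (a &&& b) := rfl

theorem pvTestBit (a n : Nat) : a.testBit n = decide (a / 2 ^ n % 2 = 1) := by
  simp [Nat.testBit, Nat.shiftRight_eq_div_pow]
  cases Nat.decEq (a / 2 ^ n % 2) 1 with
  | isTrue h => simp [h]
  | isFalse h => simp [h] at *

-- A's loop over bits 0..n-1 computes the masked complement 2^n - 1 - a % 2^n.
theorem pvLoopA (a n : Nat) :
    (List.range n).foldl
      (fun x i => if Int.land ((a : Nat) : Int) (Int.shiftLeft 1 i) = 0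
                  then x + Int.shiftLeft 1 i else x) 0
      = ((2 ^ n - 1 - a % 2 ^ n : Nat) : Int) := by
  induction n with
  | zero => simp
  | succ n ih =>
    rw [List.range_succ, List.foldl_append, ih]
    have hp : 0 < 2 ^ n := Nat.two_pow_pos n
    have hmod : a % (2 ^ n * 2) = a % 2 ^ n + 2 ^ n * (a / 2 ^ n % 2) := Nat.mod_mul
    have hlt : a % 2 ^ n < 2 ^ n := Nat.mod_lt _ hp
    have h2 : a / 2 ^ n % 2 < 2 := Nat.mod_lt _ (by norm_num)
    have hsucc : (2 : Nat) ^ (n + 1) = 2 ^ n * 2 := pow_succ 2 n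
    simp only [List.foldl_cons, List.foldl_nil, pvShiftLeft_one]
    rw [show ((a : Nat) : Int) = Int.ofNat a from rfl,
        show (((2 ^ n : Nat) : Int)) = Int.ofNat (2 ^ n) from rfl, pvLandCast,
        Nat.and_two_pow, pvTestBit]
    by_cases hb : a / 2 ^ n % 2 = 1
    · rw [hb] at hmod
      simp only [hb, decide_true, Bool.toNat_true, one_mul]
      rw [if_neg (by simpa [Int.ofNat_eq_zero] using Nat.pos_iff.mp hp)]
      rw [hsucc]
      omega
    · have hb0 : a / 2 ^ n % 2 = 0 := by omega
      rw [hb0] at hmod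
      simp only [hb, decide_false, Bool.toNat_false, zero_mul]
      rw [if_pos (show Int.ofNat 0 = 0 from rfl)]
      rw [hsucc]
      simp only [Int.ofNat_eq_natCast]
      omega

-- Nat.ldiff against the low mask 2^n - 1 is subtraction of the low bits.
theorem pvLdiffMask (n : Nat) : ∀ a : Nat, Nat.ldiff (2 ^ n - 1) a = 2 ^ n - 1 - a % 2 ^ n := by
  induction n with
  | zero =>
    intro a
    have h0 : Nat.ldiff 0 a = 0 := by
      apply Nat.eq_of_testBit_eq
      intro i
      simp [Nat.testBit_ldiff]
    simpa using h0
  | succ n ih =>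
    intro a
    have hp : 0 < 2 ^ n := Nat.two_pow_pos n
    have hsucc : (2 : Nat) ^ (n + 1) = 2 * 2 ^ n := by rw [pow_succ]; ring
    have hbit : (2 : Nat) ^ (n + 1) - 1 = Nat.bit true (2 ^ n - 1) := by
      simp [Nat.bit, hsucc]; omega
    have ha : a = Nat.bit (a.testBit 0) (a >>> 1) :=
      (Nat.bit_testBit_zero_shiftRight_one a).symm
    have hmod : a % (2 * 2 ^ n) = a % 2 + 2 * (a / 2 % 2 ^ n) := Nat.mod_mul
    have hlt : a / 2 % 2 ^ n < 2 ^ n := Nat.mod_lt _ hp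
    have hb0 : a.testBit 0 = decide (a % 2 = 1) := by simpa using pvTestBit a 0
    conv_lhs => rw [hbit, ha]
    rw [Nat.ldiff_bit, Nat.shiftRight_one, ih (a / 2), hsucc]
    by_cases hb : a % 2 = 1
    · simp only [hb0, hb, decide_true, Bool.not_true, Bool.true_and, Nat.bit]
      simp only [cond_false]
      omega
    · have h2 : a % 2 = 0 := by omega
      simp only [hb0, hb, decide_false, Bool.not_false, Bool.true_and, Nat.bit]
      simp only [cond_true]
      omega

-- B's masked complement equals the same value.
theorem pvAltX (a n : Nat) :
    Int.land (-((a : Nat) : Int) - 1) (Int.shiftLeft 1 n - 1)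
      = ((2 ^ n - 1 - a % 2 ^ n : Nat) : Int) := by
  have hp : (1 : Nat) ≤ 2 ^ n := Nat.one_le_two_pow
  have hneg : -((a : Nat) : Int) - 1 = Int.negSucc a := by
    rw [Int.negSucc_eq]; ring
  have hmask : Int.shiftLeft 1 n - 1 = Int.ofNat (2 ^ n - 1) := by
    rw [pvShiftLeft_one, show (Int.ofNat (2 ^ n - 1)) = ((2 ^ n - 1 : Nat) : Int) from rfl,
        Nat.cast_sub hp]
    simp
  rw [hneg, hmask,
      show Int.land (Int.negSucc a) (Int.ofNat (2 ^ n - 1))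
        = Int.ofNat (Nat.ldiff (2 ^ n - 1) a) from rfl,
      pvLdiffMask n a]
  rfl

-- ===== VERDICT (by name: the statement is the Claim_ definition above) =====
theorem solve_spec : Claim_equal_solve := by
  intro A _ hpre
  unfold Pre_solve at hpre
  lift A to Nat using (by omega) with a
  unfold Spec_solve
  simp only [solve, solve_alt, pyBitLength, Int.toNat_natCast]
  rw [pvLoopA, pvAltX]
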